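-- pv_equiv track=rewrite | github.com/mo-najeeb-akbar/dataset | dataset/utility.py | split_two_lists
-- ===== SOURCE A (Python) =====
-- def split_two_lists(list1, list2, k):
--     n = len(list1)  # Assuming both lists are of the same length
--     part_size = n // k
--     remainder = n % k
--
--     parts1 = []
--     parts2 = []
--     taken = 0
--     for i in range(k):
--         next_taken = taken + part_size + (1 if i < remainder else 0)
--         parts1.append(list1[taken:next_taken])
--         parts2.append(list2[taken:next_taken])
--         taken = next_taken
--
--     return parts1, parts2
-- ===== SOURCE B (Python) =====
-- def split_two_lists(list1, list2, k):
--     # Greedy peeling: take ceil(len(rest)/j) elements for each of the j remaining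
--     # parts; correct because ceil-peeling yields exactly the balanced part sizes.
--     parts1 = []
--     parts2 = []
--     rest1, rest2 = list1, list2
--     for j in range(k, 0, -1):
--         m = -(-len(rest1) // j)
--         parts1.append(rest1[:m])
--         parts2.append(rest2[:m])
--         rest1 = rest1[m:]
--         rest2 = rest2[m:]
--     return parts1, parts2
-- ===== Notes on version B (the rewrite author's own statement) =====
-- stated objective: alternative
-- what changed: Replaces A's precomputed part_size/remainder bookkeeping with greedy peeling: repeatedly take ceil(len(rest)/j) elements off the front of both remaining lists while counting the remaining parts j down; trades speed for it, since each peel copies the remaining lists.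
import Mathlib
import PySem

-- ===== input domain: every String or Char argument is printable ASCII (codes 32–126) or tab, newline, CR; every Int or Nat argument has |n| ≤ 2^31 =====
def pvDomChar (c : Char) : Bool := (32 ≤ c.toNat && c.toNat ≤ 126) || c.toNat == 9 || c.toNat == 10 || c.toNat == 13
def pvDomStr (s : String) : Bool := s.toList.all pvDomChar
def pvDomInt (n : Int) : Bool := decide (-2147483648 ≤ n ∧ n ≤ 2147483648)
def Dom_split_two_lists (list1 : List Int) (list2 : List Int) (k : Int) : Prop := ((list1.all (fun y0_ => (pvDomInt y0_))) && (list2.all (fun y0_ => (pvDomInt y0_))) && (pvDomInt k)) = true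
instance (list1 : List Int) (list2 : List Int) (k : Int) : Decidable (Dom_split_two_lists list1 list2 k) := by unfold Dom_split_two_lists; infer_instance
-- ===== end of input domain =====

-- B replaces A's precomputed part_size/remainder bookkeeping with greedy peeling:
-- take ceil(len(rest)/j) elements off the front of both remaining lists while the
-- count of remaining parts j goes down (objective: alternative).

-- ===== PORT A =====
-- literal port of A: foldl over range(k) carrying (parts1, parts2, taken)
def split_two_lists (list1 : List Int) (list2 : List Int) (k : Int) : List (List Int) × List (List Int) :=
  let n : Int := list1.length
  let part_size := PySem.Int.floordiv n k
  let remainder := PySem.Int.mod n k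
  let st := (PySem.List.pyRange 0 k 1).foldl
    (fun (st : List (List Int) × List (List Int) × Int) i =>
      let taken := st.2.2
      let next_taken := taken + part_size + (if i < remainder then 1 else 0)
      (st.1 ++ [PySem.List.slice list1 (some taken) (some next_taken)],
       st.2.1 ++ [PySem.List.slice list2 (some taken) (some next_taken)],
       next_taken))
    ([], [], 0)
  (st.1, st.2.1)

-- ===== PORT B =====
-- literal port of B: the countdown loop over j = k, k-1, …, 1 that peels
-- m = -(-len(rest1) // j) elements from both rests becomes structural recursion
-- on the count of remaining parts (k.toNat iterations; none for k ≤ 0, as in Python)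
def pvPeel (l1 l2 : List Int) : Nat → List (List Int) × List (List Int)
  | 0 => ([], [])
  | j + 1 =>
    let m : Int := -(PySem.Int.floordiv (-(l1.length : Int)) ((j : Int) + 1))
    let rest := pvPeel (PySem.List.slice l1 (some m) none) (PySem.List.slice l2 (some m) none) j
    (PySem.List.slice l1 none (some m) :: rest.1,
     PySem.List.slice l2 none (some m) :: rest.2)

def split_two_lists_alt (list1 : List Int) (list2 : List Int) (k : Int) : List (List Int) × List (List Int) :=
  pvPeel list1 list2 k.toNat

-- ===== PRECONDITION & SPEC =====
-- Pre_ excludes exactly k = 0, where Python A raises ZeroDivisionError.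
def Pre_split_two_lists (list1 : List Int) (list2 : List Int) (k : Int) : Prop := k ≠ 0
instance (list1 : List Int) (list2 : List Int) (k : Int) : Decidable (Pre_split_two_lists list1 list2 k) := by unfold Pre_split_two_lists; infer_instance
def pvWitness_split_two_lists : List Int × List Int × Int := ([1, 2, 3], [4, 5, 6], 2)

def Spec_split_two_lists (list1 : List Int) (list2 : List Int) (k : Int) (out : List (List Int) × List (List Int)) : Prop := out = split_two_lists_alt list1 list2 k
instance (list1 : List Int) (list2 : List Int) (k : Int) (out : List (List Int) × List (List Int)) : Decidable (Spec_split_two_lists list1 list2 k out) := by unfold Spec_split_two_lists; infer_instance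

-- ===== CLAIM (what is proved, stated in full; the proofs are below) =====
def Claim_equal_split_two_lists : Prop := ∀ (list1 : List Int) (list2 : List Int) (k : Int), Dom_split_two_lists list1 list2 k → Pre_split_two_lists list1 list2 k → Spec_split_two_lists list1 list2 k (split_two_lists list1 list2 k)

-- ===== LEMMAS AND PROOFS =====

-- the balanced boundary of part i when n elements are cut into k parts (Nat form)
def pvBd (n k i : Nat) : Nat := i * (n / k) + min i (n % k)

-- min over Int: the incremental step relating the closed-form bounds to A's accumulator step
theorem pv_min_step (i r : Int) : min (i + 1) r = min i r + (if i < r then 1 else 0) := by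
  split_ifs with h <;> omega

-- loop invariant for A: the fold over the first m indices produces the closed-form slices,
-- with taken = m*ps + min m r
theorem pv_loop (list1 list2 : List Int) (ps r : Int) (hr : 0 ≤ r) (m : Nat) :
    ((List.range m).map (fun j : Nat => (j : Int))).foldl
      (fun (st : List (List Int) × List (List Int) × Int) i =>
        (st.1 ++ [PySem.List.slice list1 (some st.2.2) (some (st.2.2 + ps + (if i < r then 1 else 0)))],
         st.2.1 ++ [PySem.List.slice list2 (some st.2.2) (some (st.2.2 + ps + (if i < r then 1 else 0)))],
         st.2.2 + ps + (if i < r then 1 else 0)))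
      ([], [], 0)
    = ((List.range m).map (fun j : Nat => PySem.List.slice list1
          (some ((j : Int) * ps + min (j : Int) r)) (some (((j : Int) + 1) * ps + min ((j : Int) + 1) r))),
       (List.range m).map (fun j : Nat => PySem.List.slice list2
          (some ((j : Int) * ps + min (j : Int) r)) (some (((j : Int) + 1) * ps + min ((j : Int) + 1) r))),
       (m : Int) * ps + min (m : Int) r) := by
  induction m with
  | zero => simp; omega
  | succ m ih =>
    rw [List.range_succ, List.map_append, List.foldl_append, ih]
    have hb : (m : Int) * ps + min (m : Int) r + ps + (if (m : Int) < r then 1 else 0)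
        = ((m : Int) + 1) * ps + min ((m : Int) + 1) r := by
      rw [pv_min_step]; ring
    simp only [List.map_append, List.map_cons, List.map_nil, List.foldl_cons, List.foldl_nil]
    rw [hb]
    refine Prod.ext rfl (Prod.ext rfl ?_)
    push_cast; ring

-- B's ceiling division in Nat form: -(-n // (j+1)) = (n + j) / (j + 1)
theorem pv_ceil (n j : Nat) :
    -(PySem.Int.floordiv (-(n : Int)) ((j : Int) + 1)) = (((n + j) / (j + 1) : Nat) : Int) := by
  rw [PySem.Int.neg_floordiv_neg_eq_iff_of_pos (by positivity)]
  have hd := Nat.div_add_mod (n + j) (j + 1)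
  have hm : (n + j) % (j + 1) < j + 1 := Nat.mod_lt _ (by omega)
  have hc : (j + 1) * ((n + j) / (j + 1)) = (n + j) / (j + 1) * (j + 1) := Nat.mul_comm _ _
  constructor
  · have e : ((((n + j) / (j + 1) : Nat) : Int) - 1) * ((j : Int) + 1)
        = (((n + j) / (j + 1) * (j + 1) : Nat) : Int) - ((j : Int) + 1) := by push_cast; ring
    rw [e]; omega
  · have e : (((n + j) / (j + 1) : Nat) : Int) * ((j : Int) + 1)
        = (((n + j) / (j + 1) * (j + 1) : Nat) : Int) := by push_cast; ring
    rw [e]; omega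

-- the ceiling peel amount in terms of floor division and remainder
theorem pv_ceil_parts (n j : Nat) :
    (n + j) / (j + 1) = n / (j + 1) + (if n % (j + 1) = 0 then 0 else 1) := by
  have hd := Nat.div_add_mod n (j + 1)
  have hm : n % (j + 1) < j + 1 := Nat.mod_lt _ (by omega)
  have e : n + j = (n % (j + 1) + j) + (j + 1) * (n / (j + 1)) := by omega
  rw [e, Nat.add_mul_div_left _ _ (show 0 < j + 1 by omega)]
  split_ifs with h
  · have h1 : (n % (j + 1) + j) / (j + 1) = 0 := Nat.div_eq_of_lt (by omega)
    omega
  · have h1 : (n % (j + 1) + j) / (j + 1) = 1 :=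
      Nat.div_eq_of_lt_le (by omega) (by omega)
    omega

-- the boundary identity: one peel of M = ceil(n/(j+1)) shifts the balanced boundaries
theorem pv_bd_step (n j i : Nat) (hi : i ≤ j) :
    (n + j) / (j + 1) + pvBd (n - (n + j) / (j + 1)) j i = pvBd n (j + 1) (i + 1) := by
  have hd := Nat.div_add_mod n (j + 1)
  have hm : n % (j + 1) < j + 1 := Nat.mod_lt _ (by omega)
  have hsplit : (j + 1) * (n / (j + 1)) = j * (n / (j + 1)) + n / (j + 1) := by ring
  rw [pv_ceil_parts n j]
  by_cases h0 : n % (j + 1) = 0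
  · -- exact division: the peeled rest is j * (n / (j + 1))
    have hn' : n - (n / (j + 1) + 0) = j * (n / (j + 1)) := by omega
    rw [if_pos h0, hn']
    rcases Nat.eq_zero_or_pos j with hj | hj
    · subst hj
      interval_cases i
      simp only [pvBd]
      omega
    · have hdiv : j * (n / (j + 1)) / j = n / (j + 1) := Nat.mul_div_cancel_left _ (by omega)
      have hmod : j * (n / (j + 1)) % j = 0 := Nat.mul_mod_right _ _
      simp only [pvBd, hdiv, hmod, h0]
      have e1 : (i + 1) * (n / (j + 1)) = n / (j + 1) + i * (n / (j + 1)) := by ring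
      omega
  · -- remainder ≥ 1: the peeled rest is j * (n / (j + 1)) + (n % (j + 1) - 1)
    have hj : 1 ≤ j := by omega
    have hn' : n - (n / (j + 1) + 1) = n % (j + 1) - 1 + j * (n / (j + 1)) := by omega
    rw [if_neg h0, hn']
    have hdiv : (n % (j + 1) - 1 + j * (n / (j + 1))) / j = n / (j + 1) := by
      rw [Nat.add_mul_div_left _ _ (show 0 < j by omega), Nat.div_eq_of_lt (by omega)]
      omega
    have hmod : (n % (j + 1) - 1 + j * (n / (j + 1))) % j = n % (j + 1) - 1 := by
      rw [Nat.add_mul_mod_self_left, Nat.mod_eq_of_lt (by omega)]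
    simp only [pvBd, hdiv, hmod]
    have e1 : (i + 1) * (n / (j + 1)) = n / (j + 1) + i * (n / (j + 1)) := by ring
    omega

theorem pvBd_zero (n k : Nat) : pvBd n k 0 = 0 := by simp [pvBd]

-- characterisation of B's peel: the closed-form balanced slices
theorem pv_peel_eq (j : Nat) (l1 l2 : List Int) :
    pvPeel l1 l2 j =
      ((List.range j).map (fun i =>
          (l1.drop (pvBd l1.length j i)).take (pvBd l1.length j (i + 1) - pvBd l1.length j i)),
       (List.range j).map (fun i =>
          (l2.drop (pvBd l1.length j i)).take (pvBd l1.length j (i + 1) - pvBd l1.length j i))) := by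
  induction j generalizing l1 l2 with
  | zero => simp [pvPeel]
  | succ j ih =>
    have hM : -(PySem.Int.floordiv (-(l1.length : Int)) ((j : Int) + 1))
        = (((l1.length + j) / (j + 1) : Nat) : Int) := pv_ceil l1.length j
    have key : pvPeel l1 l2 (j + 1)
        = (l1.take ((l1.length + j) / (j + 1)) ::
             (pvPeel (l1.drop ((l1.length + j) / (j + 1))) (l2.drop ((l1.length + j) / (j + 1))) j).1,
           l2.take ((l1.length + j) / (j + 1)) ::
             (pvPeel (l1.drop ((l1.length + j) / (j + 1))) (l2.drop ((l1.length + j) / (j + 1))) j).2) := by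
      show (let m : Int := -(PySem.Int.floordiv (-(l1.length : Int)) ((j : Int) + 1));
            let rest := pvPeel (PySem.List.slice l1 (some m) none) (PySem.List.slice l2 (some m) none) j
            (PySem.List.slice l1 none (some m) :: rest.1,
             PySem.List.slice l2 none (some m) :: rest.2)) = _
      rw [hM]
      simp only [PySem.List.slice_to_natCast, PySem.List.slice_from_natCast]
    rw [key, ih]
    have hlen : (l1.drop ((l1.length + j) / (j + 1))).length
        = l1.length - (l1.length + j) / (j + 1) := by simp
    have hstep : ∀ i : Nat, i ≤ j →
        (l1.length + j) / (j + 1) + pvBd (l1.length - (l1.length + j) / (j + 1)) j i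
          = pvBd l1.length (j + 1) (i + 1) := fun i hi => pv_bd_step l1.length j i hi
    rw [List.range_succ_eq_map]
    simp only [List.map_cons, List.map_map, Function.comp_def, hlen]
    refine Prod.ext ?_ ?_ <;> simp only
    all_goals
      refine congrArg₂ _ ?_ (List.map_congr_left ?_)
      · rw [pvBd_zero, ← hstep 0 (by omega), pvBd_zero]
        simp
      · intro i hi
        have hij : i < j := List.mem_range.mp hi
        have h1 := hstep i (by omega)
        have h2 := hstep (i + 1) (by omega)
        rw [List.drop_drop]
        simp only [Nat.succ_eq_add_one]
        congr 1
        · omega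
        · congr 1

-- ===== VERDICT (by name: the statement is the Claim_ definition above) =====
theorem split_two_lists_spec : Claim_equal_split_two_lists := by
  intro list1 list2 k _ hk
  unfold Spec_split_two_lists split_two_lists split_two_lists_alt
  simp only
  rw [PySem.List.pyRange_one 0 k]
  simp only [zero_add, Int.sub_zero]
  rcases lt_or_gt_of_ne hk with hneg | hpos
  · -- k < 0: A's range is empty and B peels k.toNat = 0 parts; both sides are ([], [])
    have h0 : k.toNat = 0 := by omega
    simp [h0, pvPeel]
  · -- k > 0
    have hr : 0 ≤ PySem.Int.mod (list1.length : Int) k := PySem.Int.mod_nonneg _ hpos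
    rw [pv_loop list1 list2 (PySem.Int.floordiv (list1.length : Int) k)
          (PySem.Int.mod (list1.length : Int) k) hr k.toNat]
    have hkc : ((k.toNat : Nat) : Int) = k := by omega
    have hfd : PySem.Int.floordiv (list1.length : Int) k
        = ((list1.length / k.toNat : Nat) : Int) := by
      rw [← hkc]; exact PySem.Int.floordiv_natCast _ _
    have hmd : PySem.Int.mod (list1.length : Int) k
        = ((list1.length % k.toNat : Nat) : Int) := by
      rw [← hkc]; exact PySem.Int.mod_natCast _ _
    rw [pv_peel_eq]
    refine Prod.ext ?_ ?_ <;> simp only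
    all_goals
      apply List.map_congr_left
      intro i _
      rw [hfd, hmd]
      have hb1 : (i : Int) * ((list1.length / k.toNat : Nat) : Int)
            + min (i : Int) ((list1.length % k.toNat : Nat) : Int)
          = ((pvBd list1.length k.toNat i : Nat) : Int) := by
        simp only [pvBd]; push_cast; omega
      have hb2 : ((i : Int) + 1) * ((list1.length / k.toNat : Nat) : Int)
            + min ((i : Int) + 1) ((list1.length % k.toNat : Nat) : Int)
          = ((pvBd list1.length k.toNat (i + 1) : Nat) : Int) := by
        simp only [pvBd]; push_cast; omega
      rw [hb1, hb2, PySem.List.slice_natCast]
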